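-- pv_equiv track=rewrite | github.com/Bren-svr/UTN-programacion-1 | Parcial1/funciones.py | contar_notas_por_materia
-- ===== SOURCE A (Python) =====
-- def contar_notas_por_materia(matriz_notas: list, numero_materia: int) -> list:
--     """ recibo una matriz y un numero de posicion(-1), y devuelve una nueva matriz
--     realiza un ciclo de recorrido repetitivo """
--     matriz_cantidad_notas = [0] * 10 # lista de 10 pos
--     columna = numero_materia - 1
--
--     i = 0
--     while i < len(matriz_notas):  # recorrer alumnos
--         nota = matriz_notas[i][columna]  # nota del alumno i en materia
--         if nota >= 1 and nota <= 10:
--             matriz_cantidad_notas[nota - 1] += 1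
--         i += 1
--
--     return matriz_cantidad_notas
-- ===== SOURCE B (Python) =====
-- def contar_notas_por_materia(matriz_notas: list, numero_materia: int) -> list:
--     col = [fila[numero_materia - 1] for fila in matriz_notas]
--     return [col.count(g) for g in range(1, 11)]
-- ===== Notes on version B (the rewrite author's own statement) =====
-- stated objective: simpler
-- what changed: Replaces the index-driven while loop that increments buckets in a mutable 10-slot list with extracting the subject column once and counting each grade 1..10 independently with list.count.
import Mathlib
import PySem

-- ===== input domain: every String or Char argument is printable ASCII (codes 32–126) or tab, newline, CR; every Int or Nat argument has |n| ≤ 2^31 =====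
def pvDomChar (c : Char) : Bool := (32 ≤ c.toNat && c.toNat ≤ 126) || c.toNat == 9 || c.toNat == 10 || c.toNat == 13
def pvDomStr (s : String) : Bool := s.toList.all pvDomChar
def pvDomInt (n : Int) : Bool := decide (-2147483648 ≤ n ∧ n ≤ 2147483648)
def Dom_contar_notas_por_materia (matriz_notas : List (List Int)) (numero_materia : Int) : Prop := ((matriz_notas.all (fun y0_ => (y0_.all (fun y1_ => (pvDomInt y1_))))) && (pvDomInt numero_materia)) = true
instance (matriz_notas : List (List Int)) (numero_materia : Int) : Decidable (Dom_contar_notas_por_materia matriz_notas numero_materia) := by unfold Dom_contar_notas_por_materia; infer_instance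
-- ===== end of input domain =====

-- B extracts the subject column once and counts each grade 1..10 independently with list.count,
-- replacing A's index-driven while loop over a mutable 10-slot bucket list (objective: simpler).


-- ===== PORT A =====
-- while loop over row index i = foldl over the rows; matriz_notas[i][columna] = pyGet?
-- (Pre_ guarantees it is `some`; `.getD 0` only totalises), bucket update = pySetD/pyGetD.
def contar_notas_por_materia (matriz_notas : List (List Int)) (numero_materia : Int) : List Int :=
  let columna := numero_materia - 1
  matriz_notas.foldl
    (fun acc fila =>
      let nota := (PySem.List.pyGet? fila columna).getD 0
      if 1 ≤ nota ∧ nota ≤ 10 then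
        PySem.List.pySetD acc (nota - 1) (PySem.List.pyGetD acc (nota - 1) 0 + 1)
      else acc)
    (List.replicate 10 0)

-- ===== PORT B =====
def contar_notas_por_materia_alt (matriz_notas : List (List Int)) (numero_materia : Int) : List Int :=
  let col := matriz_notas.map (fun fila => (PySem.List.pyGet? fila (numero_materia - 1)).getD 0)
  (PySem.List.pyRange 1 11 1).map (fun g => (col.count g : Int))

-- ===== PRECONDITION & SPEC =====
-- Pre_ excludes exactly the inputs where fila[numero_materia-1] raises IndexError (both A and B raise there).
def Pre_contar_notas_por_materia (matriz_notas : List (List Int)) (numero_materia : Int) : Prop :=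
  ∀ fila ∈ matriz_notas, PySem.Raise.InRange fila.length (numero_materia - 1)
instance (matriz_notas : List (List Int)) (numero_materia : Int) : Decidable (Pre_contar_notas_por_materia matriz_notas numero_materia) := by unfold Pre_contar_notas_por_materia; infer_instance
def pvWitness_contar_notas_por_materia : List (List Int) × Int := ([[7, 3], [10, 3], [7, 1]], 1)

def Spec_contar_notas_por_materia (matriz_notas : List (List Int)) (numero_materia : Int) (out : List Int) : Prop := out = contar_notas_por_materia_alt matriz_notas numero_materia
instance (matriz_notas : List (List Int)) (numero_materia : Int) (out : List Int) : Decidable (Spec_contar_notas_por_materia matriz_notas numero_materia out) := by unfold Spec_contar_notas_por_materia; infer_instance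

-- ===== CLAIM (what is proved, stated in full; the proofs are below) =====
def Claim_equal_contar_notas_por_materia : Prop := ∀ (matriz_notas : List (List Int)) (numero_materia : Int), Dom_contar_notas_por_materia matriz_notas numero_materia → Pre_contar_notas_por_materia matriz_notas numero_materia → Spec_contar_notas_por_materia matriz_notas numero_materia (contar_notas_por_materia matriz_notas numero_materia)

-- ===== LEMMAS AND PROOFS =====

-- A's loop body as a function of the extracted nota
def pvUpd (acc : List Int) (nota : Int) : List Int :=
  if 1 ≤ nota ∧ nota ≤ 10 then
    PySem.List.pySetD acc (nota - 1) (PySem.List.pyGetD acc (nota - 1) 0 + 1)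
  else acc

lemma pvUpd_length (acc : List Int) (x : Int) : (pvUpd acc x).length = acc.length := by
  unfold pvUpd
  split_ifs with h
  · exact PySem.List.length_pySetD acc _ _
  · rfl

lemma pvUpd_getD (acc : List Int) (x : Int) (k : Nat) (hlen : acc.length = 10) (hk : k < 10) :
    (pvUpd acc x).getD k 0 = acc.getD k 0 + (if x = (k : Int) + 1 then 1 else 0) := by
  by_cases hg : 1 ≤ x ∧ x ≤ 10
  · have h0 : (0 : Int) ≤ x - 1 := by omega
    have hset : pvUpd acc x = acc.set (x - 1).toNat (acc.getD (x - 1).toNat 0 + 1) := by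
      unfold pvUpd
      rw [if_pos hg, PySem.List.pySetD_of_nonneg acc _ h0, PySem.List.pyGetD_of_nonneg acc _ h0]
    rw [hset]
    by_cases hx : x = (k : Int) + 1
    · have hjk : (x - 1).toNat = k := by omega
      rw [if_pos hx, hjk]
      simp [List.getD_eq_getElem?_getD, List.getElem?_set_self (show k < acc.length by omega)]
    · have hjk : (x - 1).toNat ≠ k := by omega
      rw [if_neg hx, add_zero, List.getD_eq_getElem?_getD, List.getD_eq_getElem?_getD,
        List.getElem?_set_ne hjk, ← List.getD_eq_getElem?_getD]
  · have hx : x ≠ (k : Int) + 1 := by omega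
    unfold pvUpd
    rw [if_neg hg, if_neg hx, add_zero]

-- loop invariant: foldl of pvUpd = old buckets plus per-grade counts of the processed column
lemma pvFoldl_count (col : List Int) : ∀ (acc : List Int), acc.length = 10 →
    List.foldl pvUpd acc col =
      (List.range 10).map (fun k => acc.getD k 0 + (col.count ((k : Int) + 1) : Int)) := by
  induction col with
  | nil =>
    intro acc hlen
    simp only [List.foldl_nil, List.count_nil]
    refine List.ext_getElem (by simp [hlen]) ?_
    intro k h1 h2
    simp at h2
    simp [List.getD_eq_getElem?_getD, List.getElem?_eq_getElem (by omega : k < acc.length)]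
  | cons x xs ih =>
    intro acc hlen
    rw [List.foldl_cons, ih (pvUpd acc x) (by rw [pvUpd_length, hlen])]
    refine List.map_congr_left ?_
    intro k hk
    simp only [List.mem_range] at hk
    rw [pvUpd_getD acc x k hlen hk, List.count_cons]
    have : (x == (k : Int) + 1) = decide (x = (k : Int) + 1) := by rfl
    by_cases hx : x = (k : Int) + 1 <;> (simp [hx]; try ring)

theorem contar_notas_por_materia_spec : Claim_equal_contar_notas_por_materia := by
  intro matriz_notas numero_materia _hdom _hpre
  unfold Spec_contar_notas_por_materia contar_notas_por_materia contar_notas_por_materia_alt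
  have hfold :
      matriz_notas.foldl
        (fun acc fila =>
          let nota := (PySem.List.pyGet? fila (numero_materia - 1)).getD 0
          if 1 ≤ nota ∧ nota ≤ 10 then
            PySem.List.pySetD acc (nota - 1) (PySem.List.pyGetD acc (nota - 1) 0 + 1)
          else acc)
        (List.replicate 10 0)
      = List.foldl pvUpd (List.replicate 10 0)
          (matriz_notas.map (fun fila => (PySem.List.pyGet? fila (numero_materia - 1)).getD 0)) := by
    rw [List.foldl_map]
    rfl
  rw [hfold, pvFoldl_count _ (List.replicate 10 0) (by simp)]
  have hrange : PySem.List.pyRange 1 11 1 = [1, 2, 3, 4, 5, 6, 7, 8, 9, 10] := by decide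
  rw [hrange]
  simp [List.range_succ]
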